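-- pv_equiv track=rewrite | github.com/BrunoP030/MonolithFarm | dashboard/lineage/doc_scraper.py | _balanced_end
-- ===== SOURCE A (Python) =====
-- def _balanced_end(text: str, start: int, open_char: str, close_char: str) -> int:
--     depth = 0
--     quote = ""
--     escaped = False
--     for index in range(start, len(text)):
--         char = text[index]
--         if quote:
--             if escaped:
--                 escaped = False
--             elif char == "\\":
--                 escaped = True
--             elif char == quote:
--                 quote = ""
--             continue
--         if char in {'"', "'"}:
--             quote = char
--             continue
--         if char == open_char:
--             depth += 1
--         elif char == close_char:
--             depth -= 1
--             if depth == 0: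
--                 return index
--     return -1
-- ===== SOURCE B (Python) =====
-- def _balanced_end(text: str, start: int, open_char: str, close_char: str) -> int:
--     n = len(text)
--     depth = 0
--     index = start
--     while index < n:
--         char = text[index]
--         if char in ('"', "'"):
--             # skip over the quoted string: land on its closing quote (or run off the end)
--             index += 1
--             while index < n:
--                 if text[index] == "\\":
--                     index += 2
--                 elif text[index] == char:
--                     break
--                 else:
--                     index += 1
--         elif char == open_char:
--             depth += 1
--         elif char == close_char:
--             depth -= 1
--             if depth == 0:
--                 return index
--         index += 1
--     return -1
-- ===== Notes on version B (the rewrite author's own statement) =====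
-- stated objective: alternative
-- what changed: A is one for-loop over range(start, len) carrying quote/escaped state flags across iterations; B is an outer while-loop with only a depth counter that, on seeing a quote character, hands off to a dedicated inner while-loop that skips the whole quoted string (jumping two positions on a backslash) before resuming delimiter counting.
import Mathlib
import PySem

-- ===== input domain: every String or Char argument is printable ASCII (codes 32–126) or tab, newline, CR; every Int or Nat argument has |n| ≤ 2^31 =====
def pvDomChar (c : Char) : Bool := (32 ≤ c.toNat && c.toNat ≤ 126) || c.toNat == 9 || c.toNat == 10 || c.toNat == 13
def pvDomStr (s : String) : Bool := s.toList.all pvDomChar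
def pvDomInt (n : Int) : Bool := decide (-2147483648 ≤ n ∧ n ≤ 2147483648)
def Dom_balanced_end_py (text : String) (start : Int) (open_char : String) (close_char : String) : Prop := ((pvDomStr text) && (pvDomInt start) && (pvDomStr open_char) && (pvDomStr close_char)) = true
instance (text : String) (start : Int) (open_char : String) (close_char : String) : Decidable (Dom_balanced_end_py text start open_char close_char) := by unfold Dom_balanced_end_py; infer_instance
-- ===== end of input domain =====

-- B replaces A's single for-loop with quote/escaped state flags by an outer while-loop that,
-- upon seeing a quote, delegates to an inner loop skipping the whole quoted string (objective:
-- alternative decomposition; same linear cost). Return value only; neither version mutates.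

-- ===== PORT A =====
-- A's for-loop over range(start, len(text)) as recursion over the index list, carrying
-- (depth, quote, escaped); Python's quote string "" / the quote char is `none` / `some q`.
def pvALoop (text : String) (open_char : String) (close_char : String) :
    List Int → Int → Option Char → Bool → Int
  | [], _, _, _ => -1
  | i :: rest, depth, quote, escaped =>
    match PySem.Str.pyGet? text i with
    | none => -1   -- Python raises IndexError here; such inputs are outside Pre_
    | some char =>
      match quote with
      | some q =>
        if escaped then pvALoop text open_char close_char rest depth (some q) false
        else if char = '\\' then pvALoop text open_char close_char rest depth (some q) true
        else if char = q then pvALoop text open_char close_char rest depth none false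
        else pvALoop text open_char close_char rest depth (some q) false
      | none =>
        if char = '"' ∨ char = '\'' then
          pvALoop text open_char close_char rest depth (some char) false
        else if String.mk [char] = open_char then
          pvALoop text open_char close_char rest (depth + 1) none false
        else if String.mk [char] = close_char then
          if depth - 1 = 0 then i
          else pvALoop text open_char close_char rest (depth - 1) none false
        else pvALoop text open_char close_char rest depth none false

def balanced_end_py (text : String) (start : Int) (open_char : String) (close_char : String) : Int :=
  pvALoop text open_char close_char (PySem.List.pyRange start (PySem.Str.len text) 1) 0 none false

-- ===== PORT B =====
-- B's inner while-loop: from `index`, skip through a quoted string opened with quote char `q`;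
-- stops on the closing quote (or with index ≥ n). Fuel bounds the iteration count (index grows
-- by ≥ 1 each step, so any fuel ≥ n - index is enough; fuel 0 only pads).
def pvBInner (text : String) (n : Int) (q : Char) : Nat → Int → Int
  | 0, index => index
  | f + 1, index =>
    if index < n then
      match PySem.Str.pyGet? text index with
      | none => index   -- Python raises IndexError here; such inputs are outside Pre_
      | some c =>
        if c = '\\' then pvBInner text n q f (index + 2)
        else if c = q then index
        else pvBInner text n q f (index + 1)
    else index

-- B's outer while-loop over `index` and `depth`.
def pvBOuter (text : String) (oc : String) (cc : String) (n : Int) :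
    Nat → Int → Int → Int
  | 0, _, _ => -1
  | f + 1, index, depth =>
    if index < n then
      match PySem.Str.pyGet? text index with
      | none => -1   -- Python raises IndexError here; such inputs are outside Pre_
      | some char =>
        if char = '"' ∨ char = '\'' then
          pvBOuter text oc cc n f
            (pvBInner text n char f (index + 1) + 1) depth
        else if String.mk [char] = oc then
          pvBOuter text oc cc n f (index + 1) (depth + 1)
        else if String.mk [char] = cc then
          if depth - 1 = 0 then index
          else pvBOuter text oc cc n f (index + 1) (depth - 1)
        else pvBOuter text oc cc n f (index + 1) depth
    else -1

def balanced_end_py_alt (text : String) (start : Int) (open_char : String) (close_char : String) : Int :=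
  pvBOuter text open_char close_char (PySem.Str.len text)
    ((PySem.Str.len text - start).toNat + 1) start 0

-- ===== PRECONDITION & SPEC =====
-- Pre_ excludes exactly start < -len(text): there both Pythons raise IndexError on the first
-- (wrapped) character access; everywhere else both return (negative start ≥ -len wraps
-- identically in A and B and stays inside Pre_).
def Pre_balanced_end_py (text : String) (start : Int) (open_char : String) (close_char : String) : Prop :=
  -(PySem.Str.len text) ≤ start
instance (text : String) (start : Int) (open_char : String) (close_char : String) : Decidable (Pre_balanced_end_py text start open_char close_char) := by unfold Pre_balanced_end_py; infer_instance

def pvWitness_balanced_end_py : String × Int × String × String := ("a(b'(\\')'c)", 1, "(", ")")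

def Spec_balanced_end_py (text : String) (start : Int) (open_char : String) (close_char : String) (out : Int) : Prop := out = balanced_end_py_alt text start open_char close_char
instance (text : String) (start : Int) (open_char : String) (close_char : String) (out : Int) : Decidable (Spec_balanced_end_py text start open_char close_char out) := by unfold Spec_balanced_end_py; infer_instance

-- ===== CLAIM (what is proved, stated in full; the proofs are below) =====
def Claim_equal_balanced_end_py : Prop := ∀ (text : String) (start : Int) (open_char : String) (close_char : String), Dom_balanced_end_py text start open_char close_char → Pre_balanced_end_py text start open_char close_char → Spec_balanced_end_py text start open_char close_char (balanced_end_py text start open_char close_char)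

-- ===== LEMMAS AND PROOFS =====

-- Simp-normal spelling of the length.
lemma pvLen_eq (text : String) : PySem.Str.len text = ((text.length : Nat) : Int) := by
  simp [PySem.Str.len_eq]

-- In range ⇒ the character access succeeds.
lemma pvGet_some (text : String) (i : Int) (h1 : -((text.length : Nat) : Int) ≤ i)
    (h2 : i < ((text.length : Nat) : Int)) :
    ∃ c, PySem.List.pyGet? text.toList i = some c := by
  rcases hc : PySem.List.pyGet? text.toList i with _ | c
  · exfalso
    rw [PySem.List.pyGet?_eq_none_iff] at hc
    exact hc ⟨by simpa using h1, by simpa using h2⟩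
  · exact ⟨c, rfl⟩

-- The inner loop never moves the index backwards.
lemma pvBInner_ge (text : String) (n : Int) (q : Char) :
    ∀ (f : Nat) (i : Int), i ≤ pvBInner text n q f i := by
  intro f
  induction f with
  | zero => intro i; simp [pvBInner]
  | succ f ih =>
    intro i
    simp only [pvBInner]
    split
    · rcases hc : PySem.Str.pyGet? text i with _ | c
      · simp
      · simp only
        split_ifs
        · exact le_trans (by omega) (ih (i + 2))
        · exact le_rfl
        · exact le_trans (by omega) (ih (i + 1))
    · exact le_rfl

-- A in quote mode with escaped = true: the next character (if any) is consumed unconditionally.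
lemma pvA_escaped (text : String) (oc cc : String) (d : Int) (q : Char) (i : Int)
    (hn : -((text.length : Nat) : Int) ≤ i) :
    pvALoop text oc cc (PySem.List.pyRange i ((text.length : Nat) : Int) 1) d (some q) true
      = pvALoop text oc cc (PySem.List.pyRange (i + 1) ((text.length : Nat) : Int) 1) d (some q) false := by
  by_cases h : i < ((text.length : Nat) : Int)
  · obtain ⟨c, hc⟩ := pvGet_some text i hn h
    rw [PySem.List.pyRange_one_cons h]
    simp [pvALoop, hc]
  · rw [PySem.List.pyRange_one_eq_nil (by omega), PySem.List.pyRange_one_eq_nil (by omega)]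
    simp [pvALoop]

-- A in quote mode from index i equals A back in normal mode just after the position B's inner
-- loop stops at (any sufficient fuel).
lemma pvA_quote (text : String) (oc cc : String) (d : Int) (q : Char) :
    ∀ (f : Nat) (i : Int), -((text.length : Nat) : Int) ≤ i →
    (((text.length : Nat) : Int) - i).toNat ≤ f →
    pvALoop text oc cc (PySem.List.pyRange i ((text.length : Nat) : Int) 1) d (some q) false
      = pvALoop text oc cc
          (PySem.List.pyRange (pvBInner text ((text.length : Nat) : Int) q f i + 1) ((text.length : Nat) : Int) 1)
          d none false := by
  intro f
  induction f with
  | zero =>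
    intro i hlo hf
    rw [PySem.List.pyRange_one_eq_nil (by omega), pvBInner,
      PySem.List.pyRange_one_eq_nil (by omega)]
    simp [pvALoop]
  | succ f ih =>
    intro i hlo hf
    by_cases h : i < ((text.length : Nat) : Int)
    · obtain ⟨c, hc⟩ := pvGet_some text i hlo h
      rw [PySem.List.pyRange_one_cons h]
      simp only [pvBInner, if_pos h, PySem.Str.pyGet?_eq, PySem.Chars.pyGet?_eq_listPyGet?, hc]
      by_cases hb : c = '\\'
      · simp only [pvALoop, PySem.Str.pyGet?_eq, PySem.Chars.pyGet?_eq_listPyGet?, hc,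
          hb]
        rw [pvA_escaped text oc cc d q (i + 1) (by omega)]
        have h2 : i + 1 + 1 = i + 2 := by ring
        rw [h2]
        exact ih (i + 2) (by omega) (by omega)
      · by_cases hq : c = q
        · subst hq
          simp [pvALoop, hc, hb]
        · simp only [pvALoop, PySem.Str.pyGet?_eq, PySem.Chars.pyGet?_eq_listPyGet?, hc,
            if_neg hb, if_neg (by simpa using hq)]
          exact ih (i + 1) (by omega) (by omega)
    · rw [PySem.List.pyRange_one_eq_nil (by omega), pvBInner, if_neg h,
        PySem.List.pyRange_one_eq_nil (by omega)]
      simp [pvALoop]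

-- Main invariant: A in normal mode from index i equals B's outer loop at index i, for any
-- fuel strictly above the remaining length.
lemma pvMain (text : String) (oc cc : String) :
    ∀ (f : Nat) (i d : Int), -((text.length : Nat) : Int) ≤ i →
    (((text.length : Nat) : Int) - i).toNat < f →
    pvALoop text oc cc (PySem.List.pyRange i ((text.length : Nat) : Int) 1) d none false
      = pvBOuter text oc cc ((text.length : Nat) : Int) f i d := by
  intro f
  induction f with
  | zero => intro i d _ hf; omega
  | succ f ih =>
    intro i d hlo hf
    by_cases h : i < ((text.length : Nat) : Int)
    · obtain ⟨c, hc⟩ := pvGet_some text i hlo h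
      rw [PySem.List.pyRange_one_cons h]
      simp only [pvALoop, pvBOuter, if_pos h, PySem.Str.pyGet?_eq,
        PySem.Chars.pyGet?_eq_listPyGet?, hc]
      by_cases hquote : c = '"' ∨ c = '\''
      · simp only [if_pos hquote]
        have hge : i + 1 ≤ pvBInner text ((text.length : Nat) : Int) c f (i + 1) :=
          pvBInner_ge text ((text.length : Nat) : Int) c f (i + 1)
        rw [pvA_quote text oc cc d c f (i + 1) (by omega) (by omega)]
        exact ih (pvBInner text ((text.length : Nat) : Int) c f (i + 1) + 1) d (by omega) (by omega)
      · simp only [if_neg hquote]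
        by_cases hoc : String.mk [c] = oc
        · simp only [if_pos hoc]
          exact ih (i + 1) (d + 1) (by omega) (by omega)
        · simp only [if_neg hoc]
          by_cases hcc : String.mk [c] = cc
          · simp only [if_pos hcc]
            by_cases hd : d - 1 = 0
            · simp [hd]
            · simp only [if_neg hd]
              exact ih (i + 1) (d - 1) (by omega) (by omega)
          · simp only [if_neg hcc]
            exact ih (i + 1) d (by omega) (by omega)
    · rw [PySem.List.pyRange_one_eq_nil (by omega)]
      simp [pvALoop, pvBOuter, h]

-- ===== VERDICT (by name: the statement is the Claim_ definition above) =====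
theorem balanced_end_py_spec : Claim_equal_balanced_end_py := by
  intro text start oc cc _hdom hpre
  unfold Spec_balanced_end_py balanced_end_py balanced_end_py_alt
  unfold Pre_balanced_end_py at hpre
  rw [pvLen_eq] at hpre
  rw [pvLen_eq]
  exact pvMain text oc cc (((((text.length : Nat) : Int)) - start).toNat + 1) start 0 hpre (by omega)
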